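-- pv_equiv track=rewrite | github.com/damaki/community-bb-runtimes | tests/support/target_info.py | get_config_values
-- ===== SOURCE A (Python) =====
-- from typing import Dict, Tuple, Any
--
-- def get_config_values(
--     config_vars: Dict, updated_values: Dict[str, str]
-- ) -> Dict[str, Any]:
--     """Gets the set of configuration.values to apply in the test crate's Alire manifest"""
--     return {
--         var_name: (
--             updated_values[var_name]
--             if var_name in updated_values
--             else var_info["default"]
--         )
--         for var_name, var_info in config_vars.items()
--     }
-- ===== SOURCE B (Python) =====
-- def get_config_values(config_vars, updated_values):
--     """Gets the set of configuration.values to apply in the test crate's Alire manifest"""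
--     # Stage 1: a defaults dict; stage 2: walk the overrides and patch entries in place.
--     result = {name: info.get("default") for name, info in config_vars.items()}
--     for name, value in updated_values.items():
--         if name in result:
--             result[name] = value
--     return result
-- ===== Notes on version B (the rewrite author's own statement) =====
-- stated objective: alternative
-- what changed: A makes one pass over config_vars choosing updated_values[name] or the default per entry; B flips the traversal: it first builds a dict of defaults from config_vars, then iterates over updated_values and overwrites in place each entry whose key exists, ignoring foreign keys.
import Mathlib
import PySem

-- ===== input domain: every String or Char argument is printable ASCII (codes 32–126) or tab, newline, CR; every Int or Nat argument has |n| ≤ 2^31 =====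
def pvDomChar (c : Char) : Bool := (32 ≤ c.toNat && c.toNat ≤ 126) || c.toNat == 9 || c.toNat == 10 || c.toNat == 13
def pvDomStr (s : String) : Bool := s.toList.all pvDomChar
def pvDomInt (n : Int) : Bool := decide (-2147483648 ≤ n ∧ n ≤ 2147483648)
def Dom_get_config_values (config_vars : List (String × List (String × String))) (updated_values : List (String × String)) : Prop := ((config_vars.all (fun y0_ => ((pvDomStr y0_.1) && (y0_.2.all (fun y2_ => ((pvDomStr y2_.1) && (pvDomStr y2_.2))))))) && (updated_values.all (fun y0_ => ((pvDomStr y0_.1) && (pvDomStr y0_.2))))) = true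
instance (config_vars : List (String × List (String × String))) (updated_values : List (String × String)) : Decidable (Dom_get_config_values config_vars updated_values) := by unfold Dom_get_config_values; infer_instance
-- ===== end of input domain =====

-- B builds the defaults dict first and then patches it in place from updated_values
-- (traversal flipped: the override pass iterates updated_values); no speed claim.

-- ===== PORT A =====
-- A: a dict comprehension over config_vars.items(); value = updated_values[name] if present,
-- else info["default"].  info["default"] raises KeyError when absent — Pre_ excludes that;
-- the `.getD ""` arm is a dummy never reached inside Pre_.
def get_config_values (config_vars : List (String × List (String × String))) (updated_values : List (String × String)) : List (String × String) :=
  config_vars.map (fun p =>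
    (p.1, match updated_values.lookup p.1 with
          | some v => v
          | none => (p.2.lookup "default").getD ""))

-- ===== PORT B =====
-- stage-2 step: `if name in result: result[name] = value` — a dict-assignment on an
-- existing key overwrites the (unique, inside Pre_) entry in place.
def gcvUpdate (res : List (String × Option String)) (q : String × String) : List (String × Option String) :=
  if (res.lookup q.1).isSome then
    res.map (fun p => if p.1 == q.1 then (p.1, some q.2) else p)
  else res

-- B: stage 1 is the comprehension {name: info.get("default")} (get → Option, None = none);
-- stage 2 folds the override pass over updated_values.  The final map is the type-convention
-- coercion Option String → String (a leftover `none` means Python returned a non-str value,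
-- excluded by Pre_; `.getD ""` is the dummy there).
def get_config_values_alt (config_vars : List (String × List (String × String))) (updated_values : List (String × String)) : List (String × String) :=
  let defaults := config_vars.map (fun p => (p.1, p.2.lookup "default"))
  let result := updated_values.foldl gcvUpdate defaults
  result.map (fun p => (p.1, p.2.getD ""))

-- ===== PRECONDITION & SPEC =====
-- Pre_ excludes (i) inputs on which Python A raises KeyError (a config var neither overridden
-- nor carrying a "default") and (ii) assoc lists whose updated_values keys are not distinct:
-- those do not represent any Python dict (a dict has unique keys), so no Python input is excluded.
def Pre_get_config_values (config_vars : List (String × List (String × String))) (updated_values : List (String × String)) : Prop :=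
  (config_vars.all (fun p => (updated_values.lookup p.1).isSome || (p.2.lookup "default").isSome) = true)
  ∧ (updated_values.map Prod.fst).Nodup
instance (config_vars : List (String × List (String × String))) (updated_values : List (String × String)) : Decidable (Pre_get_config_values config_vars updated_values) := by unfold Pre_get_config_values; infer_instance

def pvWitness_get_config_values : (List (String × List (String × String))) × (List (String × String)) :=
  ([("opt", [("default", "0")]), ("mode", [("type", "Str")])], [("mode", "fast"), ("other", "x")])

def Spec_get_config_values (config_vars : List (String × List (String × String))) (updated_values : List (String × String)) (out : List (String × String)) : Prop := out = get_config_values_alt config_vars updated_values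
instance (config_vars : List (String × List (String × String))) (updated_values : List (String × String)) (out : List (String × String)) : Decidable (Spec_get_config_values config_vars updated_values out) := by unfold Spec_get_config_values; infer_instance

-- ===== CLAIM =====
def Claim_equal_get_config_values : Prop := ∀ (config_vars : List (String × List (String × String))) (updated_values : List (String × String)), Dom_get_config_values config_vars updated_values → Pre_get_config_values config_vars updated_values → Spec_get_config_values config_vars updated_values (get_config_values config_vars updated_values)

-- ===== LEMMAS AND PROOFS =====

theorem lookup_eq_none_of_not_mem_keys {ν : Type} (l : List (String × ν)) (k : String)
    (h : k ∉ l.map Prod.fst) : l.lookup k = none := by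
  induction l with
  | nil => simp
  | cons q rest ih =>
    simp only [List.map_cons, List.mem_cons, not_or] at h
    have hk : (k == q.1) = false := by
      simp [h.1]
    simp [List.lookup, hk, ih h.2]

theorem lookup_isSome_of_mem {ν : Type} (l : List (String × ν)) (p : String × ν)
    (hp : p ∈ l) : (l.lookup p.1).isSome = true := by
  induction l with
  | nil => simp at hp
  | cons q rest ih =>
    rcases List.mem_cons.mp hp with rfl | h
    · simp [List.lookup]
    · by_cases hk : p.1 == q.1 <;> simp [List.lookup, hk, ih h]

-- Folding the override pass over a nodup-keyed list rewrites each entry whose key it mentions.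
theorem fold_update_eq_map (uv : List (String × String)) :
    ∀ (L : List (String × Option String)), (uv.map Prod.fst).Nodup →
    uv.foldl gcvUpdate L
      = L.map (fun p => match uv.lookup p.1 with
                        | some v => (p.1, some v)
                        | none => p) := by
  induction uv with
  | nil => intro L _; simp
  | cons q rest ih =>
    intro L hnd
    simp only [List.map_cons, List.nodup_cons] at hnd
    have hq : rest.lookup q.1 = none := lookup_eq_none_of_not_mem_keys rest q.1 hnd.1
    simp only [List.foldl_cons]
    rw [ih _ hnd.2]
    unfold gcvUpdate
    by_cases hl : (L.lookup q.1).isSome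
    · simp only [hl, if_true, List.map_map]
      apply List.map_congr_left
      intro p _
      by_cases hpk : p.1 = q.1
      · simp [Function.comp, hpk, List.lookup, hq]
      · have : (p.1 == q.1) = false := by simp [hpk]
        simp [Function.comp, this, List.lookup]
    · simp only [hl, if_false]
      apply List.map_congr_left
      intro p hp
      have hpk : p.1 ≠ q.1 := by
        intro e
        exact hl (e ▸ lookup_isSome_of_mem L p hp)
      have hb : (p.1 == q.1) = false := by simp [hpk]
      simp [List.lookup, hb]

theorem get_config_values_eq_alt (config_vars : List (String × List (String × String)))
    (updated_values : List (String × String))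
    (hnd : (updated_values.map Prod.fst).Nodup) :
    get_config_values config_vars updated_values
      = get_config_values_alt config_vars updated_values := by
  unfold get_config_values get_config_values_alt
  dsimp only
  rw [fold_update_eq_map updated_values _ hnd, List.map_map, List.map_map]
  apply List.map_congr_left
  intro p _
  cases h : updated_values.lookup p.1 <;> simp [Function.comp, h]

-- ===== VERDICT =====
theorem get_config_values_spec : Claim_equal_get_config_values := by
  intro cv uv _ hpre
  unfold Spec_get_config_values
  exact get_config_values_eq_alt cv uv hpre.2
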